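-- pv_equiv track=rewrite | github.com/meryemmhamdi1/x-continuous-learning | humanlearn/data_analysis/analyze_mem_egs.py | check_if_stay_at_4
-- ===== SOURCE A (Python) =====
-- def check_if_stay_at_4(value):
--     flag = False
--     for val in value:
--         if val == 4:
--             flag = True
--         if flag:
--             if val != 4:
--                 flag = False
--                 return flag
--     return flag
-- ===== SOURCE B (Python) =====
-- def check_if_stay_at_4(value):
--     vals = list(value)
--     for i in range(len(vals)):
--         if vals[i] == 4:
--             return all(x == 4 for x in vals[i:])
--     return False
-- ===== Notes on version B (the rewrite author's own statement) =====
-- stated objective: simpler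
-- what changed: Replaces the mutable flag state-machine with early return by a two-step decomposition: find the first 4, then check the suffix is all 4s.
import Mathlib
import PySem

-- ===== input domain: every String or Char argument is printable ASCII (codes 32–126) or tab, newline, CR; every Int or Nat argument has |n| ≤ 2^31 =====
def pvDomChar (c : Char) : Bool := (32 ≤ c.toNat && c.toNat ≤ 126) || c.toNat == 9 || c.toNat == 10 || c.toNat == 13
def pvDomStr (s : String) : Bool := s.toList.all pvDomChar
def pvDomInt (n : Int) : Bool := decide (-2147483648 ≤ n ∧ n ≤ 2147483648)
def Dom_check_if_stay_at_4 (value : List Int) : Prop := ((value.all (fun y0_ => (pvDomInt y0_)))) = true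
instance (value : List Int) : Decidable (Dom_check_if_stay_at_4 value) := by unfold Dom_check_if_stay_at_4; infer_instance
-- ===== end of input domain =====

-- B replaces A's mutable-flag state machine by a find-first-4-then-verify-suffix decomposition (same cost, simpler).

-- ===== PORT A =====
-- A's loop with the mutable `flag` and the early `return flag` inside the loop.
def pvALoop : List Int → Bool → Bool
  | [], flag => flag
  | v :: vs, flag =>
    let flag := if v == 4 then true else flag
    if flag then
      (if v != 4 then false else pvALoop vs flag)
    else pvALoop vs flag

def check_if_stay_at_4 (value : List Int) : Bool := pvALoop value false

-- ===== PORT B =====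
-- B's scan for the first element equal to 4; on finding it, `all` over the suffix (inclusive).
def pvBLoop : List Int → Bool
  | [] => false
  | v :: vs => if v == 4 then (v :: vs).all (fun x => x == 4) else pvBLoop vs

def check_if_stay_at_4_alt (value : List Int) : Bool := pvBLoop value

-- ===== PRECONDITION & SPEC =====
def Spec_check_if_stay_at_4 (value : List Int) (out : Bool) : Prop := out = check_if_stay_at_4_alt value
instance (value : List Int) (out : Bool) : Decidable (Spec_check_if_stay_at_4 value out) := by unfold Spec_check_if_stay_at_4; infer_instance

-- ===== CLAIM (what is proved, stated in full; the proofs are below) =====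
def Claim_equal_check_if_stay_at_4 : Prop := ∀ (value : List Int), Dom_check_if_stay_at_4 value → Spec_check_if_stay_at_4 value (check_if_stay_at_4 value)

-- ===== LEMMAS AND PROOFS =====

-- With the flag already set, A's loop returns true iff every remaining element is 4.
theorem pvALoop_true (xs : List Int) : pvALoop xs true = xs.all (fun x => x == 4) := by
  induction xs with
  | nil => rfl
  | cons v vs ih =>
    by_cases h : v = 4 <;> simp [pvALoop, h, ih]

theorem pvALoop_false_eq (xs : List Int) : pvALoop xs false = pvBLoop xs := by
  induction xs with
  | nil => rfl
  | cons v vs ih =>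
    by_cases h : v = 4
    · simp [pvALoop, pvBLoop, h, pvALoop_true]
    · simp [pvALoop, pvBLoop, h, ih]

-- ===== VERDICT (by name: the statement is the Claim_ definition above) =====
theorem check_if_stay_at_4_spec : Claim_equal_check_if_stay_at_4 := by
  intro value _
  unfold Spec_check_if_stay_at_4 check_if_stay_at_4 check_if_stay_at_4_alt
  exact pvALoop_false_eq value
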